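-- pv_equiv track=rewrite | github.com/tomasnyberg/cp_notebook | codeforces/857/C.py | check_submatrices
-- ===== SOURCE A (Python) =====
-- def check_submatrices(B):
--     rows, cols = len(B), len(B[0])
--     for i in range(rows-3):
--         for j in range(cols-3):
--             A11, A12, A13, A14 = B[i][j], B[i][j+1], B[i][j+2], B[i][j+3]
--             A21, A22, A23, A24 = B[i+1][j], B[i+1][j+1], B[i+1][j+2], B[i+1][j+3]
--             A31, A32, A33, A34 = B[i+2][j], B[i+2][j+1], B[i+2][j+2], B[i+2][j+3]
--             A41, A42, A43, A44 = B[i+3][j], B[i+3][j+1], B[i+3][j+2], B[i+3][j+3]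
--             if A11^A12^A21^A22 != A33^A34^A43^A44 or A13^A14^A23^A24 != A31^A32^A41^A42:
--                 return False
--     return True
-- ===== SOURCE B (Python) =====
-- def check_submatrices(B):
--     rows, cols = len(B), len(B[0])
--     if rows < 4 or cols < 4:
--         return True
--     # 2D prefix-XOR table (integral image): P[a][b] = XOR of B[r][c] for r<a, c<b
--     prev = [0] * (cols + 1)
--     P = [prev]
--     for i in range(rows):
--         cur = [0]
--         for j in range(cols):
--             cur.append(B[i][j] ^ prev[j + 1] ^ cur[j] ^ prev[j])
--         P.append(cur)
--         prev = cur
--     # a 4x4 window is good iff two six-corner parities of P vanish: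
--     # P[i][j]^P[i][j+2]^P[i+2][j]^P[i+2][j+4]^P[i+4][j+2]^P[i+4][j+4] == 0
--     # encodes "TL 2x2 block xor == BR 2x2 block xor", and symmetrically for TR/BL.
--     for i in range(rows - 3):
--         for j in range(cols - 3):
--             if (P[i][j] ^ P[i][j + 2] ^ P[i + 2][j] ^ P[i + 2][j + 4]
--                     ^ P[i + 4][j + 2] ^ P[i + 4][j + 4]) \
--                or (P[i][j + 2] ^ P[i][j + 4] ^ P[i + 2][j] ^ P[i + 2][j + 4]
--                     ^ P[i + 4][j] ^ P[i + 4][j + 2]):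
--                 return False
--     return True
-- ===== Notes on version B (the rewrite author's own statement) =====
-- stated objective: alternative
-- what changed: B builds a 2D prefix-XOR table (integral image) by a recurrence and decides each 4x4 window by testing two six-corner parities of that table, instead of re-reading sixteen raw matrix cells and comparing 2x2 block XORs per window as A does.
import Mathlib
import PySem

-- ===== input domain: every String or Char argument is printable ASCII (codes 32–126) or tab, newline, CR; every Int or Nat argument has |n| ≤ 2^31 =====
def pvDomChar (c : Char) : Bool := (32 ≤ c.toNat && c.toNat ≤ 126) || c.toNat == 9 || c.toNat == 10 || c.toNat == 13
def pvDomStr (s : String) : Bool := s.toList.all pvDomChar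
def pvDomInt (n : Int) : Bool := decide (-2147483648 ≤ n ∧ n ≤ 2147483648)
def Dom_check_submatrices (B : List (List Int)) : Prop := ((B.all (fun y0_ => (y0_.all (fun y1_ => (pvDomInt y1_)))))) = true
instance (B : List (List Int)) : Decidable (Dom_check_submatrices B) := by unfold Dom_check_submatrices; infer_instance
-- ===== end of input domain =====

-- B builds a 2D prefix-XOR table (integral image) and decides each 4x4 window by two
-- six-corner parities of that table instead of re-reading sixteen raw cells per window.

-- ===== PORT A =====
-- literal transliteration: nested for-loops with early `return False` become nested List.all
def check_submatrices (B : List (List Int)) : Bool :=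
  let rows : Int := B.length
  let cols : Int := (PySem.List.pyGetD B 0 []).length
  (PySem.List.pyRange 0 (rows - 3) 1).all fun i =>
    (PySem.List.pyRange 0 (cols - 3) 1).all fun j =>
      let r1 := PySem.List.pyGetD B i []
      let r2 := PySem.List.pyGetD B (i + 1) []
      let r3 := PySem.List.pyGetD B (i + 2) []
      let r4 := PySem.List.pyGetD B (i + 3) []
      let a11 := PySem.List.pyGetD r1 j 0; let a12 := PySem.List.pyGetD r1 (j + 1) 0
      let a13 := PySem.List.pyGetD r1 (j + 2) 0; let a14 := PySem.List.pyGetD r1 (j + 3) 0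
      let a21 := PySem.List.pyGetD r2 j 0; let a22 := PySem.List.pyGetD r2 (j + 1) 0
      let a23 := PySem.List.pyGetD r2 (j + 2) 0; let a24 := PySem.List.pyGetD r2 (j + 3) 0
      let a31 := PySem.List.pyGetD r3 j 0; let a32 := PySem.List.pyGetD r3 (j + 1) 0
      let a33 := PySem.List.pyGetD r3 (j + 2) 0; let a34 := PySem.List.pyGetD r3 (j + 3) 0
      let a41 := PySem.List.pyGetD r4 j 0; let a42 := PySem.List.pyGetD r4 (j + 1) 0
      let a43 := PySem.List.pyGetD r4 (j + 2) 0; let a44 := PySem.List.pyGetD r4 (j + 3) 0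
      !(decide (PySem.Int.bxor (PySem.Int.bxor (PySem.Int.bxor a11 a12) a21) a22
               ≠ PySem.Int.bxor (PySem.Int.bxor (PySem.Int.bxor a33 a34) a43) a44)
        || decide (PySem.Int.bxor (PySem.Int.bxor (PySem.Int.bxor a13 a14) a23) a24
               ≠ PySem.Int.bxor (PySem.Int.bxor (PySem.Int.bxor a31 a32) a41) a42))

-- ===== PORT B =====
-- inner loop body: cur.append(B[i][j] ^ prev[j+1] ^ cur[j] ^ prev[j])
def pvRowStep (bi prev : List Int) (cur : List Int) (j : Int) : List Int :=
  cur ++ [PySem.Int.bxor (PySem.Int.bxor (PySem.Int.bxor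
    (PySem.List.pyGetD bi j 0) (PySem.List.pyGetD prev (j + 1) 0))
    (PySem.List.pyGetD cur j 0)) (PySem.List.pyGetD prev j 0)]

def check_submatrices_alt (B : List (List Int)) : Bool :=
  let rows : Int := B.length
  let cols : Int := (PySem.List.pyGetD B 0 []).length
  if rows < 4 || cols < 4 then true
  else
    -- 2D prefix-XOR table, built row by row from the recurrence
    let prev0 : List Int := List.replicate (cols.toNat + 1) 0
    let st := (PySem.List.pyRange 0 rows 1).foldl
      (fun (st : List (List Int) × List Int) i =>
        let bi := PySem.List.pyGetD B i []
        let cur := (PySem.List.pyRange 0 cols 1).foldl (pvRowStep bi st.2) [0]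
        (st.1 ++ [cur], cur))
      ([prev0], prev0)
    let P := st.1
    let g := fun (a b : Int) => PySem.List.pyGetD (PySem.List.pyGetD P a []) b 0
    (PySem.List.pyRange 0 (rows - 3) 1).all fun i =>
      (PySem.List.pyRange 0 (cols - 3) 1).all fun j =>
        (PySem.Int.bxor (PySem.Int.bxor (PySem.Int.bxor (PySem.Int.bxor (PySem.Int.bxor
            (g i j) (g i (j + 2))) (g (i + 2) j)) (g (i + 2) (j + 4)))
            (g (i + 4) (j + 2))) (g (i + 4) (j + 4)) == 0)
        && (PySem.Int.bxor (PySem.Int.bxor (PySem.Int.bxor (PySem.Int.bxor (PySem.Int.bxor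
            (g i (j + 2)) (g i (j + 4))) (g (i + 2) j)) (g (i + 2) (j + 4)))
            (g (i + 4) j)) (g (i + 4) (j + 2)) == 0)

-- ===== PRECONDITION & SPEC =====
-- Pre_ restricts to the task's natural domain: nonempty, and when both dimensions are
-- >= 4 (so that A scans windows at all) a rectangular-enough grid (no row shorter than
-- row 0). On malformed ragged grids A raises IndexError unless a failing window happens
-- to precede the short row in scan order; B's eager table build raises there instead.
def Pre_check_submatrices (B : List (List Int)) : Prop :=
  B ≠ [] ∧ ((4 ≤ B.length ∧ 4 ≤ (B.headD []).length) →
    ∀ r ∈ B, (B.headD []).length ≤ r.length)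
instance (B : List (List Int)) : Decidable (Pre_check_submatrices B) := by
  unfold Pre_check_submatrices; infer_instance

def pvWitness_check_submatrices : List (List Int) :=
  [[1, 2, 3, 4], [5, 6, 7, 8], [9, 10, 11, 12], [13, 14, 15, 0]]

def Spec_check_submatrices (B : List (List Int)) (out : Bool) : Prop := out = check_submatrices_alt B
instance (B : List (List Int)) (out : Bool) : Decidable (Spec_check_submatrices B out) := by
  unfold Spec_check_submatrices; infer_instance

-- ===== CLAIM (what is proved, stated in full; the proofs are below) =====
def Claim_equal_check_submatrices : Prop := ∀ (B : List (List Int)), Dom_check_submatrices B → Pre_check_submatrices B → Spec_check_submatrices B (check_submatrices B)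

-- ===== LEMMAS AND PROOFS =====

-- ----- xor algebra for PySem.Int.bxor: (sign, magnitude) encoding gives associativity -----
def pvMag (a : Int) : Nat := if 0 ≤ a then a.toNat else (-a - 1).toNat
def pvDec (s : Bool) (m : Nat) : Int := if s then -(m : Int) - 1 else m

theorem pv_bxor_eq (a b : Int) :
    PySem.Int.bxor a b = pvDec (xor (decide (a < 0)) (decide (b < 0))) (pvMag a ^^^ pvMag b) := by
  unfold PySem.Int.bxor pvDec pvMag
  by_cases ha : 0 ≤ a <;> by_cases hb : 0 ≤ b <;>
    simp [ha, hb] <;> omega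

theorem pv_mag_dec (s : Bool) (m : Nat) : pvMag (pvDec s m) = m := by
  cases s <;> simp [pvDec, pvMag] <;> omega

theorem pv_neg_dec (s : Bool) (m : Nat) : decide (pvDec s m < 0) = s := by
  cases s <;> simp [pvDec] <;> omega

theorem pv_bxor_assoc (a b c : Int) :
    PySem.Int.bxor (PySem.Int.bxor a b) c = PySem.Int.bxor a (PySem.Int.bxor b c) := by
  rw [pv_bxor_eq a b, pv_bxor_eq b c, pv_bxor_eq, pv_bxor_eq, pv_mag_dec, pv_mag_dec,
      pv_neg_dec, pv_neg_dec, Nat.xor_assoc, Bool.xor_assoc]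

theorem pv_bxor_zero_left (a : Int) : PySem.Int.bxor 0 a = a := by
  rw [PySem.Int.bxor_comm]; exact PySem.Int.bxor_zero a

theorem pv_bxor_left_comm (a b c : Int) :
    PySem.Int.bxor a (PySem.Int.bxor b c) = PySem.Int.bxor b (PySem.Int.bxor a c) := by
  rw [← pv_bxor_assoc, PySem.Int.bxor_comm a b, pv_bxor_assoc]

theorem pv_bxor_cancel_left (a b : Int) : PySem.Int.bxor a (PySem.Int.bxor a b) = b := by
  rw [← pv_bxor_assoc, PySem.Int.bxor_self, pv_bxor_zero_left]

theorem pv_bxor_eq_zero_iff (a b : Int) : PySem.Int.bxor a b = 0 ↔ a = b := by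
  constructor
  · intro h
    have := pv_bxor_cancel_left a b
    rw [h, PySem.Int.bxor_zero] at this
    omega
  · intro h; rw [h, PySem.Int.bxor_self]

-- ----- the mathematical prefix-XOR function and its corner identities -----
def pvCell (B : List (List Int)) (a b : Nat) : Int := (B.getD a []).getD b 0

def pvF (B : List (List Int)) : Nat → Nat → Int
  | 0, _ => 0
  | _ + 1, 0 => 0
  | a + 1, b + 1 =>
    PySem.Int.bxor (PySem.Int.bxor (PySem.Int.bxor
      (pvCell B a b) (pvF B a (b + 1))) (pvF B (a + 1) b)) (pvF B a b)

-- the four corners of one table cell xor to the raw cell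
theorem pvF_corner (B : List (List Int)) (a b : Nat) :
    PySem.Int.bxor (PySem.Int.bxor (PySem.Int.bxor
      (pvF B (a + 1) (b + 1)) (pvF B a (b + 1))) (pvF B (a + 1) b)) (pvF B a b)
    = pvCell B a b := by
  simp only [pvF]
  simp [PySem.Int.bxor_comm, pv_bxor_left_comm,
        PySem.Int.bxor_self, PySem.Int.bxor_zero, pv_bxor_zero_left]

-- four corners spanning a 2x2 block xor to the 2x2 block of raw cells
theorem pvF_corner2 (B : List (List Int)) (a b : Nat) :
    PySem.Int.bxor (PySem.Int.bxor (PySem.Int.bxor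
      (pvF B (a + 2) (b + 2)) (pvF B a (b + 2))) (pvF B (a + 2) b)) (pvF B a b)
    = PySem.Int.bxor (PySem.Int.bxor (PySem.Int.bxor
      (pvCell B a b) (pvCell B a (b + 1))) (pvCell B (a + 1) b)) (pvCell B (a + 1) (b + 1)) := by
  rw [← pvF_corner B a b, ← pvF_corner B a (b + 1), ← pvF_corner B (a + 1) b,
      ← pvF_corner B (a + 1) (b + 1)]
  simp only [show b + 1 + 1 = b + 2 from rfl, show a + 1 + 1 = a + 2 from rfl]
  simp [PySem.Int.bxor_comm, pv_bxor_left_comm, pv_bxor_cancel_left,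
        ]

-- ----- the built table computes pvF -----
theorem pv_row_inv (B : List (List Int)) (bi prev : List Int) (a c : Nat)
    (hbi : ∀ j : Nat, bi.getD j 0 = pvCell B a j)
    (hprev : ∀ b : Nat, b ≤ c → prev.getD b 0 = pvF B a b) :
    ∀ n : Nat, n ≤ c →
      ((PySem.List.pyRange 0 (n : Int) 1).foldl (pvRowStep bi prev) [0]).length = n + 1 ∧
      ∀ b : Nat, b ≤ n →
        ((PySem.List.pyRange 0 (n : Int) 1).foldl (pvRowStep bi prev) [0]).getD b 0
          = pvF B (a + 1) b := by
  intro n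
  induction n with
  | zero =>
    intro _
    rw [PySem.List.pyRange_one_eq_nil (by omega)]
    refine ⟨rfl, ?_⟩
    intro b hb
    interval_cases b
    simp [pvF]
  | succ n ih =>
    intro hn
    obtain ⟨ihlen, ihval⟩ := ih (by omega)
    have hcast : ((n + 1 : Nat) : Int) = (n : Int) + 1 := by push_cast; ring
    rw [hcast, PySem.List.pyRange_one_succ_right (by positivity), List.foldl_append]
    set cur := (PySem.List.pyRange 0 (n : Int) 1).foldl (pvRowStep bi prev) [0] with hcur
    have hv : pvRowStep bi prev cur (n : Int) = cur ++ [pvF B (a + 1) (n + 1)] := by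
      unfold pvRowStep
      have h1 : ((n : Int) + 1) = ((n + 1 : Nat) : Int) := by push_cast; ring
      rw [h1]
      simp only [PySem.List.pyGetD_natCast]
      rw [hbi n, hprev (n + 1) (by omega), hprev n (by omega), ihval n (by omega)]
      conv_rhs => rw [pvF]
    simp only [List.foldl_cons, List.foldl_nil]
    rw [hv]
    constructor
    · simp [ihlen]
    · intro b hb
      by_cases hbn : b ≤ n
      · rw [List.getD_append _ _ _ _ (by omega)]
        exact ihval b hbn
      · have hbeq : b = n + 1 := by omega
        subst hbeq
        rw [List.getD_append_right _ _ _ _ (by omega), ihlen]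
        simp

def pvBuild (B : List (List Int)) (c : Nat) (m : Int) : List (List Int) × List Int :=
  (PySem.List.pyRange 0 m 1).foldl
    (fun (st : List (List Int) × List Int) i =>
      let bi := PySem.List.pyGetD B i []
      let cur := (PySem.List.pyRange 0 (c : Int) 1).foldl (pvRowStep bi st.2) [0]
      (st.1 ++ [cur], cur))
    ([List.replicate (c + 1) 0], List.replicate (c + 1) 0)

theorem pv_table_inv (B : List (List Int)) (c : Nat) :
    ∀ m : Nat,
      (pvBuild B c (m : Int)).1.length = m + 1 ∧
      (∀ b : Nat, b ≤ c → (pvBuild B c (m : Int)).2.getD b 0 = pvF B m b) ∧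
      (∀ a : Nat, a ≤ m → ∀ b : Nat, b ≤ c →
        ((pvBuild B c (m : Int)).1.getD a []).getD b 0 = pvF B a b) := by
  intro m
  induction m with
  | zero =>
    unfold pvBuild
    rw [PySem.List.pyRange_one_eq_nil (a := 0) (b := ((0 : Nat) : Int)) (by simp)]
    refine ⟨rfl, ?_, ?_⟩
    · intro b hb
      simp [pvF]
    · intro a ha b hb
      interval_cases a
      simp [pvF]
  | succ m ih =>
    obtain ⟨ihlen, ihprev, ihall⟩ := ih
    have hcast : ((m + 1 : Nat) : Int) = (m : Int) + 1 := by push_cast; ring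
    have hstep : pvBuild B c ((m + 1 : Nat) : Int)
        = ((pvBuild B c (m : Int)).1 ++
            [(PySem.List.pyRange 0 (c : Int) 1).foldl
              (pvRowStep (PySem.List.pyGetD B (m : Int) []) (pvBuild B c (m : Int)).2) [0]],
           (PySem.List.pyRange 0 (c : Int) 1).foldl
              (pvRowStep (PySem.List.pyGetD B (m : Int) []) (pvBuild B c (m : Int)).2) [0]) := by
      unfold pvBuild
      rw [hcast, PySem.List.pyRange_one_succ_right (by positivity), List.foldl_append]
      rfl
    have hrow := pv_row_inv B (PySem.List.pyGetD B (m : Int) []) (pvBuild B c (m : Int)).2 m c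
      (fun j => by simp [pvCell]) ihprev c (le_refl c)
    obtain ⟨hrlen, hrval⟩ := hrow
    rw [hstep]
    refine ⟨by simp [ihlen], fun b hb => hrval b hb, ?_⟩
    intro a ha b hb
    by_cases ham : a ≤ m
    · rw [List.getD_append _ _ _ _ (by omega)]
      exact ihall a ham b hb
    · have : a = m + 1 := by omega
      subst this
      rw [List.getD_append_right _ _ _ _ (by omega), ihlen]
      simpa using hrval b hb

-- defeq restatement of port B through pvBuild (proof is rfl: same computation)
theorem pv_alt_unfold (B : List (List Int)) :
    check_submatrices_alt B =
      (if ((B.length : Int) < 4 || (((PySem.List.pyGetD B 0 []).length : Int) < 4)) then true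
       else
        let P := (pvBuild B (PySem.List.pyGetD B 0 []).length (B.length : Int)).1
        let g := fun (a b : Int) => PySem.List.pyGetD (PySem.List.pyGetD P a []) b 0
        (PySem.List.pyRange 0 ((B.length : Int) - 3) 1).all fun i =>
          (PySem.List.pyRange 0 (((PySem.List.pyGetD B 0 []).length : Int) - 3) 1).all fun j =>
            (PySem.Int.bxor (PySem.Int.bxor (PySem.Int.bxor (PySem.Int.bxor (PySem.Int.bxor
                (g i j) (g i (j + 2))) (g (i + 2) j)) (g (i + 2) (j + 4)))
                (g (i + 4) (j + 2))) (g (i + 4) (j + 4)) == 0)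
            && (PySem.Int.bxor (PySem.Int.bxor (PySem.Int.bxor (PySem.Int.bxor (PySem.Int.bxor
                (g i (j + 2)) (g i (j + 4))) (g (i + 2) j)) (g (i + 2) (j + 4)))
                (g (i + 4) j)) (g (i + 4) (j + 2)) == 0)) := rfl

-- the first six-corner parity is the xor of the TL and BR 2x2 block xors
theorem pv_six1 (B : List (List Int)) (a b : Nat) :
    PySem.Int.bxor (PySem.Int.bxor (PySem.Int.bxor (PySem.Int.bxor (PySem.Int.bxor
      (pvF B a b) (pvF B a (b + 2))) (pvF B (a + 2) b)) (pvF B (a + 2) (b + 4)))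
      (pvF B (a + 4) (b + 2))) (pvF B (a + 4) (b + 4))
    = PySem.Int.bxor
        (PySem.Int.bxor (PySem.Int.bxor (PySem.Int.bxor
          (pvCell B a b) (pvCell B a (b + 1))) (pvCell B (a + 1) b)) (pvCell B (a + 1) (b + 1)))
        (PySem.Int.bxor (PySem.Int.bxor (PySem.Int.bxor
          (pvCell B (a + 2) (b + 2)) (pvCell B (a + 2) (b + 3))) (pvCell B (a + 3) (b + 2)))
          (pvCell B (a + 3) (b + 3))) := by
  rw [← pvF_corner2 B a b, ← pvF_corner2 B (a + 2) (b + 2)]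
  simp only [show a + 2 + 2 = a + 4 from rfl, show b + 2 + 2 = b + 4 from rfl,
             ]
  simp [PySem.Int.bxor_comm, pv_bxor_left_comm, pv_bxor_cancel_left,
        ]

-- the second six-corner parity is the xor of the TR and BL 2x2 block xors
theorem pv_six2 (B : List (List Int)) (a b : Nat) :
    PySem.Int.bxor (PySem.Int.bxor (PySem.Int.bxor (PySem.Int.bxor (PySem.Int.bxor
      (pvF B a (b + 2)) (pvF B a (b + 4))) (pvF B (a + 2) b)) (pvF B (a + 2) (b + 4)))
      (pvF B (a + 4) b)) (pvF B (a + 4) (b + 2))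
    = PySem.Int.bxor
        (PySem.Int.bxor (PySem.Int.bxor (PySem.Int.bxor
          (pvCell B a (b + 2)) (pvCell B a (b + 3))) (pvCell B (a + 1) (b + 2)))
          (pvCell B (a + 1) (b + 3)))
        (PySem.Int.bxor (PySem.Int.bxor (PySem.Int.bxor
          (pvCell B (a + 2) b) (pvCell B (a + 2) (b + 1))) (pvCell B (a + 3) b))
          (pvCell B (a + 3) (b + 1))) := by
  rw [← pvF_corner2 B a (b + 2), ← pvF_corner2 B (a + 2) b]
  simp only [show a + 2 + 2 = a + 4 from rfl, show b + 2 + 2 = b + 4 from rfl,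
             ]
  simp [PySem.Int.bxor_comm, pv_bxor_left_comm, pv_bxor_cancel_left,
        ]

theorem pv_all_congr {α : Type} (l : List α) (p q : α → Bool)
    (h : ∀ x ∈ l, p x = q x) : l.all p = l.all q := by
  induction l with
  | nil => rfl
  | cons x t ih =>
    simp only [List.all_cons]
    rw [h x (by simp), ih (fun y hy => h y (by simp [hy]))]

-- ===== VERDICT (by name: the statement is the Claim_ definition above) =====
theorem check_submatrices_spec : Claim_equal_check_submatrices := by
  intro B _ _
  unfold Spec_check_submatrices
  rw [pv_alt_unfold]
  unfold check_submatrices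
  simp only []
  by_cases hsmall : (B.length : Int) < 4 ∨ ((PySem.List.pyGetD B 0 []).length : Int) < 4
  · rw [if_pos (by rcases hsmall with h | h <;> simp [h])]
    rcases hsmall with h | h
    · rw [PySem.List.pyRange_one_eq_nil (by omega)]; rfl
    · rw [pv_all_congr _ _ (fun _ => true)
        (fun i _ => by rw [PySem.List.pyRange_one_eq_nil (by omega)]; rfl)]
      simp
  · push Not at hsmall
    obtain ⟨hr4, hc4⟩ := hsmall
    rw [if_neg (by simp; omega)]
    have htab := (pv_table_inv B (PySem.List.pyGetD B 0 []).length B.length).2.2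
    apply pv_all_congr
    intro i hi
    rw [PySem.List.mem_pyRange_one] at hi
    apply pv_all_congr
    intro j hj
    rw [PySem.List.mem_pyRange_one] at hj
    obtain ⟨hi0, hiR⟩ := hi
    obtain ⟨hj0, hjC⟩ := hj
    have hia : i = ((i.toNat : Nat) : Int) := by omega
    have hjb : j = ((j.toNat : Nat) : Int) := by omega
    set a := i.toNat with ha
    set b := j.toNat with hb
    have haR : a + 4 ≤ B.length := by omega
    have hbC : b + 4 ≤ (PySem.List.pyGetD B 0 []).length := by omega
    rw [hia, hjb]
    simp only [show ((a : Int) + 1) = ((a + 1 : Nat) : Int) by push_cast; ring,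
               show ((a : Int) + 2) = ((a + 2 : Nat) : Int) by push_cast; ring,
               show ((a : Int) + 3) = ((a + 3 : Nat) : Int) by push_cast; ring,
               show ((a : Int) + 4) = ((a + 4 : Nat) : Int) by push_cast; ring,
               show ((b : Int) + 1) = ((b + 1 : Nat) : Int) by push_cast; ring,
               show ((b : Int) + 2) = ((b + 2 : Nat) : Int) by push_cast; ring,
               show ((b : Int) + 3) = ((b + 3 : Nat) : Int) by push_cast; ring,
               show ((b : Int) + 4) = ((b + 4 : Nat) : Int) by push_cast; ring,
               PySem.List.pyGetD_natCast]
    rw [htab a (by omega) b (by omega),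
        htab a (by omega) (b + 2) (by omega),
        htab a (by omega) (b + 4) (by omega),
        htab (a + 2) (by omega) b (by omega),
        htab (a + 2) (by omega) (b + 4) (by omega),
        htab (a + 4) (by omega) b (by omega),
        htab (a + 4) (by omega) (b + 2) (by omega),
        htab (a + 4) (by omega) (b + 4) (by omega)]
    rw [pv_six1, pv_six2]
    simp only [pvCell]
    simp only [ne_eq, decide_not, Bool.not_or, Bool.not_not, Bool.beq_eq_decide_eq]
    simp only [pv_bxor_eq_zero_iff]
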